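-- pv_equiv track=rewrite | github.com/ArunSurya15/Go | bus_booking/backend/common/city_search.py | _matches_city_group
-- ===== SOURCE A (Python) =====
-- def _matches_city_group(low: str, group: frozenset[str]) -> bool:
--     if len(low) < 2:
--         return False
--     for g in group:
--         if low == g:
--             return True
--         if len(low) >= 3 and (low in g or g in low):
--             return True
--     return False
-- ===== SOURCE B (Python) =====
-- def _matches_city_group(low: str, group: frozenset[str]) -> bool:
--     n = len(low)
--     if n < 2:
--         return False
--     if n == 2:
--         return low in group
--     # length-indexed window matching: for each distinct length present in the
--     # group, hash-check every window of `low` of that length against the group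
--     # (this covers equality and "g in low"); then one pass for "low in g".
--     lengths = {len(g) for g in group}
--     for L in lengths:
--         if L <= n and any(low[i:i + L] in group for i in range(n - L + 1)):
--             return True
--     return any(low in g for g in group)
-- ===== Notes on version B (the rewrite author's own statement) =====
-- stated objective: alternative
-- what changed: Replaces A's per-element equality/substring scan by a case split on len(low) plus length-indexed window matching: len==2 is a loop-free set membership, and for len>=3 the 'g in low' and equality cases are found by hashing every window of low whose length occurs in the group against the set, leaving only one plain pass for 'low in g'.
import Mathlib
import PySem

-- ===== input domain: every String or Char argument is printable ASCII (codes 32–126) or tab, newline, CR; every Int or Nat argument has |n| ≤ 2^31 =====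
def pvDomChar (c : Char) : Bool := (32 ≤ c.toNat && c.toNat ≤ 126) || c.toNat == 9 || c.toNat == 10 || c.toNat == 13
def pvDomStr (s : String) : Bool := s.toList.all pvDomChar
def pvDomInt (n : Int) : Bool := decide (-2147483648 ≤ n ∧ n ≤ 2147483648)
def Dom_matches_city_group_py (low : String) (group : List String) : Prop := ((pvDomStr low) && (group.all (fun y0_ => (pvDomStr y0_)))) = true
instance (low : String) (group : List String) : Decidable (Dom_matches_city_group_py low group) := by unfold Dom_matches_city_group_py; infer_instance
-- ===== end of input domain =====

-- B replaces A's per-element equality/substring scan by a case split on len(low) plus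
-- length-indexed window matching: len==2 is a loop-free membership test; for len>=3 the
-- equality and "g in low" cases are found by hash-checking every window of low whose
-- length occurs in the group, leaving one plain pass for "low in g"; objective: alternative.

-- ===== PORT A =====
-- the `for g in group:` loop of A, returning at the first match
def pvALoop (low : String) (group : List String) : Bool :=
  match group with
  | [] => false
  | g :: rest =>
    if low == g then true
    else if decide (3 ≤ PySem.Str.len low) && (PySem.Str.isIn low g || PySem.Str.isIn g low) then true
    else pvALoop low rest

def matches_city_group_py (low : String) (group : List String) : Bool :=
  if PySem.Str.len low < 2 then false
  else pvALoop low group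

-- ===== PORT B =====
-- `lengths = {len(g) for g in group}` and the `for L in lengths:` loop with its
-- early return, then the final `any(low in g for g in group)`
def matches_city_group_py_alt (low : String) (group : List String) : Bool :=
  if PySem.Str.len low < 2 then false
  else if PySem.Str.len low == 2 then group.contains low
  else
    if (PySem.Set.ofList (group.map (fun g => PySem.Str.len g))).any (fun L =>
        decide (L ≤ PySem.Str.len low) &&
        (PySem.List.pyRange 0 (PySem.Str.len low - L + 1) 1).any (fun i =>
          group.contains (PySem.Str.slice low (some i) (some (i + L)))))
    then true
    else group.any (fun g => PySem.Str.isIn low g)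

-- ===== PRECONDITION & SPEC =====
def Spec_matches_city_group_py (low : String) (group : List String) (out : Bool) : Prop := out = matches_city_group_py_alt low group
instance (low : String) (group : List String) (out : Bool) : Decidable (Spec_matches_city_group_py low group out) := by unfold Spec_matches_city_group_py; infer_instance

-- ===== CLAIM (what is proved, stated in full; the proofs are below) =====
def Claim_equal_matches_city_group_py : Prop := ∀ (low : String) (group : List String), Dom_matches_city_group_py low group → Spec_matches_city_group_py low group (matches_city_group_py low group)

-- ===== LEMMAS AND PROOFS =====

-- when len(low) == 2 the substring branch of A's loop is dead: it is just membership
theorem pvALoop_len2 (low : String) (group : List String) (h : PySem.Str.len low = 2) :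
    pvALoop low group = group.contains low := by
  induction group with
  | nil => simp [pvALoop]
  | cons g rest ih =>
    simp only [pvALoop, h]
    by_cases hg : low = g
    · subst hg; simp
    · have hb : (low == g) = false := by simp [hg]
      simp only [hb]
      norm_num
      simp [ih, hg]

-- A's loop as an `any` of its disjunction
theorem pvALoop_eq_any (low : String) (group : List String) (h : 3 ≤ PySem.Str.len low) :
    pvALoop low group
      = group.any (fun g => (low == g) || PySem.Str.isIn low g || PySem.Str.isIn g low) := by
  induction group with
  | nil => simp [pvALoop]
  | cons g rest ih =>
    simp only [pvALoop, h, decide_true, Bool.true_and, List.any_cons]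
    by_cases hg : low = g
    · subst hg; simp
    · have hb : (low == g) = false := by simp [hg]
      by_cases hs : (PySem.Str.isIn low g || PySem.Str.isIn g low) = true
      · simp only [PySem.Str.isIn_eq] at hs
        simp [hb, hs]
      · simp only [Bool.or_eq_true, not_or, PySem.Str.isIn_eq] at hs
        simp [hb, hs.1, hs.2, ih]

-- a slice low[i:i+L] with 0 ≤ i, 0 ≤ L is an infix of low
theorem slice_infix (low : String) (i L : Int) (hi : 0 ≤ i) (hL : 0 ≤ L) :
    (PySem.Str.slice low (some i) (some (i + L))).toList <:+: low.toList := by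
  rw [PySem.Str.toList_slice, PySem.Chars.slice_eq_listSlice]
  rw [PySem.List.slice_toNat _ hi (by omega)]
  exact ((List.take_prefix _ _).isInfix).trans ((List.drop_suffix _ _).isInfix)

-- conversely, an infix g of low is the slice at its offset
theorem infix_eq_slice (low g : String) (h : g.toList <:+: low.toList) :
    ∃ i : Int, 0 ≤ i ∧ i + PySem.Str.len g ≤ PySem.Str.len low ∧
      PySem.Str.slice low (some i) (some (i + PySem.Str.len g)) = g := by
  obtain ⟨a, b, hab⟩ := h
  refine ⟨(a.length : Int), by positivity, ?_, ?_⟩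
  · have : low.toList.length = a.length + g.toList.length + b.length := by
      rw [← hab]; simp; omega
    simp only [PySem.Str.len_eq]
    have h1 : low.length = low.toList.length := by simp
    have h2 : g.length = g.toList.length := by simp
    omega
  · apply String.ext
    have hg : PySem.Str.len g = ((g.toList.length : Nat) : Int) := by
      simp [PySem.Str.len_eq]
    rw [hg]
    have hsl : PySem.List.slice low.toList (some ((a.length : Nat) : Int))
        (some (((a.length : Nat) : Int) + ((g.toList.length : Nat) : Int)))
        = (low.toList.drop a.length).take g.toList.length :=
      PySem.List.slice_natCast_add low.toList a.length g.toList.length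
    have hd : low.toList.drop a.length = g.toList ++ b := by
      rw [← hab, List.append_assoc, List.drop_left]
    have : (PySem.Str.slice low (some ((a.length : Nat) : Int))
        (some (((a.length : Nat) : Int) + ((g.toList.length : Nat) : Int)))).toList = g.toList := by
      rw [PySem.Str.toList_slice, PySem.Chars.slice_eq_listSlice, hsl, hd, List.take_left]
    simpa [String.toList] using this

-- B's window loop finds a group member iff some group member is an infix of low
theorem window_iff (low : String) (group : List String) :
    ((PySem.Set.ofList (group.map (fun g => PySem.Str.len g))).any (fun L =>
        decide (L ≤ PySem.Str.len low) &&
        (PySem.List.pyRange 0 (PySem.Str.len low - L + 1) 1).any (fun i =>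
          group.contains (PySem.Str.slice low (some i) (some (i + L))))) = true)
      ↔ ∃ g ∈ group, g.toList <:+: low.toList := by
  constructor
  · rintro h
    simp only [List.any_eq_true, Bool.and_eq_true, decide_eq_true_eq] at h
    obtain ⟨L, hLmem, hLle, i, hi, hmem⟩ := h
    have hLmem' : L ∈ group.map (fun g => PySem.Str.len g) :=
      (PySem.Set.mem_ofList _ _).mp hLmem
    obtain ⟨g0, _, hg0⟩ := List.mem_map.mp hLmem'
    have hL0 : 0 ≤ L := by rw [← hg0]; simp [PySem.Str.len_eq]
    have hi0 : 0 ≤ i := (PySem.List.mem_pyRange_one.mp hi).1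
    rw [List.contains_iff_mem] at hmem
    exact ⟨_, hmem, slice_infix low i L hi0 hL0⟩
  · rintro ⟨g, hg, hinf⟩
    obtain ⟨i, hi0, hile, heq⟩ := infix_eq_slice low g hinf
    simp only [List.any_eq_true, Bool.and_eq_true, decide_eq_true_eq]
    refine ⟨PySem.Str.len g, ?_, ?_, i, ?_, ?_⟩
    · exact (PySem.Set.mem_ofList _ _).mpr (List.mem_map.mpr ⟨g, hg, rfl⟩)
    · have : (0:Int) ≤ i := hi0; omega
    · exact PySem.List.mem_pyRange_one.mpr ⟨hi0, by omega⟩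
    · rw [List.contains_iff_mem, heq]; exact hg

-- ===== VERDICT (by name: the statement is the Claim_ definition above) =====
theorem matches_city_group_py_spec : Claim_equal_matches_city_group_py := by
  intro low group _
  unfold Spec_matches_city_group_py matches_city_group_py matches_city_group_py_alt
  by_cases h2 : PySem.Str.len low < 2
  · rw [if_pos h2, if_pos h2]
  · rw [if_neg h2, if_neg h2]
    by_cases he : PySem.Str.len low = 2
    · rw [pvALoop_len2 low group he, if_pos (by simpa using he)]
    · have h3 : 3 ≤ PySem.Str.len low := by
        have := PySem.Str.len_eq low
        omega
      rw [if_neg (by simpa using he), pvALoop_eq_any low group h3]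
      by_cases hw : ((PySem.Set.ofList (group.map (fun g => PySem.Str.len g))).any (fun L =>
          decide (L ≤ PySem.Str.len low) &&
          (PySem.List.pyRange 0 (PySem.Str.len low - L + 1) 1).any (fun i =>
            group.contains (PySem.Str.slice low (some i) (some (i + L))))) = true)
      · rw [if_pos hw]
        obtain ⟨g, hg, hinf⟩ := (window_iff low group).mp hw
        refine List.any_eq_true.mpr ⟨g, hg, ?_⟩
        simp only [Bool.or_eq_true, beq_iff_eq, PySem.Str.isIn_eq]
        exact Or.inr ((PySem.Chars.isIn_iff_infix _ _).mpr hinf)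
      · rw [if_neg hw]
        rw [Bool.eq_iff_iff]
        constructor
        · intro hA
          simp only [List.any_eq_true, Bool.or_eq_true, beq_iff_eq] at hA ⊢
          obtain ⟨g, hg, hcase⟩ := hA
          rcases hcase with (heq | hlg) | hgl
          · exact absurd ((window_iff low group).mpr ⟨g, hg, by rw [← heq]⟩) hw
          · exact ⟨g, hg, hlg⟩
          · exact absurd ((window_iff low group).mpr
              ⟨g, hg, by rw [PySem.Str.isIn_eq] at hgl; exact (PySem.Chars.isIn_iff_infix _ _).mp hgl⟩) hw
        · intro hB
          obtain ⟨g, hg, hlg⟩ := List.any_eq_true.mp hB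
          refine List.any_eq_true.mpr ⟨g, hg, ?_⟩
          simp only [PySem.Str.isIn_eq] at hlg
          simp only [Bool.or_eq_true, beq_iff_eq]
          exact Or.inl (Or.inr hlg)
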